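-- pv_equiv track=rewrite | github.com/dealmeida-gabriel-1945/simpelx_tableau_in_python | solver.py | monta_vetor_de_retorno_simplex_2_fases
-- ===== SOURCE A (Python) =====
-- def monta_vetor_de_retorno_simplex_2_fases(tableau_2a_fase, resultado_dicionario, quantidade_de_variaveis_base):
--     """
--     Essa função monta o vetor de resposta para o problema de simplex 2 fases
--     :param tableau_2a_fase: matriz tableau da segunda fase do simplex 2 fases
--     :param resultado_dicionario: o dicionário que mostra qual linha está o valor de cada variável base
--     :param quantidade_de_variaveis_base: quantidade de variáveis base do problema
--     :return: vetor contendo os valores de cada uma das variáveis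
--     """
--     vetor_resultado = list()
--     variaveis_nao_nulas = [x for x in resultado_dicionario.values()]
--     for x in range(1, quantidade_de_variaveis_base + 1):
--         if x in variaveis_nao_nulas:
--             index_linha = variaveis_nao_nulas.index(x) + 1
--             vetor_resultado.append(tableau_2a_fase[index_linha][0])
--         else:
--             vetor_resultado.append(0)
--
--     return vetor_resultado
-- ===== SOURCE B (Python) =====
-- def monta_vetor_de_retorno_simplex_2_fases(tableau_2a_fase, resultado_dicionario, quantidade_de_variaveis_base):
--     vetor_resultado = [0] * quantidade_de_variaveis_base
--     seen = set()
--     for i, v in enumerate(resultado_dicionario.values()):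
--         if 1 <= v <= quantidade_de_variaveis_base and v not in seen:
--             seen.add(v)
--             vetor_resultado[v - 1] = tableau_2a_fase[i + 1][0]
--     return vetor_resultado
-- ===== Notes on version B (the rewrite author's own statement) =====
-- stated objective: faster
-- what changed: B scatters: it preallocates a zero vector of length n and makes one forward pass over the dict's values, writing tableau[i+1][0] into slot v-1 at each first occurrence of a value in 1..n (tracked by a seen-set), instead of A's gather loop over 1..n with a membership test and a linear .index scan per position.
import Mathlib
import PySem

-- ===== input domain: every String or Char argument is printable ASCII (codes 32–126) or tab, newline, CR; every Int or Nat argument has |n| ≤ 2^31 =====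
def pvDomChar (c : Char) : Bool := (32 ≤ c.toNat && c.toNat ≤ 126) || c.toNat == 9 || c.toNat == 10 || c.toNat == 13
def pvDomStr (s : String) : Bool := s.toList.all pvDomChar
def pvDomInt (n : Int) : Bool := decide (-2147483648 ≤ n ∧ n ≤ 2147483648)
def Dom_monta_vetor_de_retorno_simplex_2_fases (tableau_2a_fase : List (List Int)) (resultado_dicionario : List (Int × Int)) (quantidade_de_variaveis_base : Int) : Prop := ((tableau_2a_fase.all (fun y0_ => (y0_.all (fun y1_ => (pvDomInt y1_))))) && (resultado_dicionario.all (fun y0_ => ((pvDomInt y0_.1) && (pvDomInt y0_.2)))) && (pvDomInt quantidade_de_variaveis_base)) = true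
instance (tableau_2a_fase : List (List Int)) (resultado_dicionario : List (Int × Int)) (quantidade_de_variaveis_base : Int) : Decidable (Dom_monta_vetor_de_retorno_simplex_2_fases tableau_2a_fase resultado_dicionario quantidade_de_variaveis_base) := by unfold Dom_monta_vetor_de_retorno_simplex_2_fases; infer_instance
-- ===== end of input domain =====

-- B preallocates a zero vector and scatters the dict's values into it in one forward pass
-- (seen-set for first-occurrence-wins), replacing A's per-position membership + .index scans
-- (objective: faster, O(n+m) vs O(n*m)).

-- ===== PORT A =====
def monta_vetor_de_retorno_simplex_2_fases (tableau_2a_fase : List (List Int)) (resultado_dicionario : List (Int × Int)) (quantidade_de_variaveis_base : Int) : List Int :=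
  let variaveis_nao_nulas : List Int := resultado_dicionario.map (·.2)
  (PySem.List.pyRange 1 (quantidade_de_variaveis_base + 1) 1).foldl
    (fun vetor_resultado x =>
      if x ∈ variaveis_nao_nulas then
        let index_linha : Int := ((PySem.List.index? variaveis_nao_nulas x).getD 0 : Nat) + 1
        vetor_resultado ++ [PySem.List.pyGetD (PySem.List.pyGetD tableau_2a_fase index_linha []) 0 0]
      else
        vetor_resultado ++ [0]) []

-- ===== PORT B =====
-- loop body of Source B: on (i, v), if 1 <= v <= n and v not in seen, write tableau[i+1][0] into slot v-1
def pvScatterStep (tableau_2a_fase : List (List Int)) (n : Int) (st : List Int × PySem.Set Int) (p : Int × Int) : List Int × PySem.Set Int :=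
  if 1 ≤ p.2 ∧ p.2 ≤ n ∧ p.2 ∉ st.2 then
    (st.1.set (p.2 - 1).toNat (PySem.List.pyGetD (PySem.List.pyGetD tableau_2a_fase (p.1 + 1) []) 0 0),
     PySem.Set.add st.2 p.2)
  else st

def monta_vetor_de_retorno_simplex_2_fases_alt (tableau_2a_fase : List (List Int)) (resultado_dicionario : List (Int × Int)) (quantidade_de_variaveis_base : Int) : List Int :=
  let vals : List Int := resultado_dicionario.map (·.2)
  ((PySem.List.enumerate vals 0).foldl (pvScatterStep tableau_2a_fase quantidade_de_variaveis_base)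
    (List.replicate quantidade_de_variaveis_base.toNat 0, PySem.Set.empty)).1

-- ===== PRECONDITION & SPEC =====
-- Pre_ excludes exactly the inputs on which Python A raises IndexError: some value in
-- 1..n whose first-occurrence row index points past the tableau or at an empty row.
def Pre_monta_vetor_de_retorno_simplex_2_fases (tableau_2a_fase : List (List Int)) (resultado_dicionario : List (Int × Int)) (quantidade_de_variaveis_base : Int) : Prop :=
  ∀ k ∈ List.range (resultado_dicionario.map (·.2)).length,
    (1 ≤ (resultado_dicionario.map (·.2)).getD k 0 ∧
     (resultado_dicionario.map (·.2)).getD k 0 ≤ quantidade_de_variaveis_base ∧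
     (resultado_dicionario.map (·.2)).getD k 0 ∉ (resultado_dicionario.map (·.2)).take k) →
    (k + 1 < tableau_2a_fase.length ∧ tableau_2a_fase.getD (k + 1) [] ≠ [])
instance (tableau_2a_fase : List (List Int)) (resultado_dicionario : List (Int × Int)) (quantidade_de_variaveis_base : Int) : Decidable (Pre_monta_vetor_de_retorno_simplex_2_fases tableau_2a_fase resultado_dicionario quantidade_de_variaveis_base) := by unfold Pre_monta_vetor_de_retorno_simplex_2_fases; infer_instance
def pvWitness_monta_vetor_de_retorno_simplex_2_fases : List (List Int) × (List (Int × Int)) × Int :=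
  ([[3, 1], [5, 0], [7]], [(0, 1), (1, 2)], 2)

def Spec_monta_vetor_de_retorno_simplex_2_fases (tableau_2a_fase : List (List Int)) (resultado_dicionario : List (Int × Int)) (quantidade_de_variaveis_base : Int) (out : List Int) : Prop := out = monta_vetor_de_retorno_simplex_2_fases_alt tableau_2a_fase resultado_dicionario quantidade_de_variaveis_base
instance (tableau_2a_fase : List (List Int)) (resultado_dicionario : List (Int × Int)) (quantidade_de_variaveis_base : Int) (out : List Int) : Decidable (Spec_monta_vetor_de_retorno_simplex_2_fases tableau_2a_fase resultado_dicionario quantidade_de_variaveis_base out) := by unfold Spec_monta_vetor_de_retorno_simplex_2_fases; infer_instance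

-- ===== CLAIM (what is proved, stated in full; the proofs are below) =====
def Claim_equal_monta_vetor_de_retorno_simplex_2_fases : Prop := ∀ (tableau_2a_fase : List (List Int)) (resultado_dicionario : List (Int × Int)) (quantidade_de_variaveis_base : Int), Dom_monta_vetor_de_retorno_simplex_2_fases tableau_2a_fase resultado_dicionario quantidade_de_variaveis_base → Pre_monta_vetor_de_retorno_simplex_2_fases tableau_2a_fase resultado_dicionario quantidade_de_variaveis_base → Spec_monta_vetor_de_retorno_simplex_2_fases tableau_2a_fase resultado_dicionario quantidade_de_variaveis_base (monta_vetor_de_retorno_simplex_2_fases tableau_2a_fase resultado_dicionario quantidade_de_variaveis_base)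

-- ===== LEMMAS AND PROOFS =====

theorem pv_fold_append_map (f : Int → Int) (l : List Int) (acc : List Int) :
    l.foldl (fun r x => r ++ [f x]) acc = acc ++ l.map f := by
  induction l generalizing acc with
  | nil => simp
  | cons a l ih => simp [ih]

-- the scatter fold preserves the result vector's length
theorem pv_scatter_len (t : List (List Int)) (n : Int) (l : List (Int × Int)) (st : List Int × PySem.Set Int) :
    (l.foldl (pvScatterStep t n) st).1.length = st.1.length := by
  induction l generalizing st with
  | nil => rfl
  | cons p l ih =>
    rw [List.foldl_cons, ih]
    unfold pvScatterStep
    split <;> simp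

-- what the scatter fold leaves at position j
theorem pv_scatter_get (t : List (List Int)) (n : Int) (vals : List Int) (s : Int)
    (res : List Int) (seen : PySem.Set Int) (j : Nat) (hj : j < n.toNat) (hlen : res.length = n.toNat) :
    ((PySem.List.enumerate vals s).foldl (pvScatterStep t n) (res, seen)).1[j]? =
      if ((j : Int) + 1) ∈ seen then res[j]?
      else
        match PySem.List.index? vals ((j : Int) + 1) with
        | some i => some (PySem.List.pyGetD (PySem.List.pyGetD t (s + (i : Int) + 1) []) 0 0)
        | none => res[j]? := by
  induction vals generalizing s res seen with
  | nil =>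
    rw [PySem.List.enumerate_nil]
    simp [PySem.List.index?_eq_idxOf?]
  | cons v vs ih =>
    rw [PySem.List.enumerate_cons, List.foldl_cons]
    by_cases hC : 1 ≤ v ∧ v ≤ n ∧ v ∉ seen
    · have hstep : pvScatterStep t n (res, seen) (s, v) =
          (res.set (v - 1).toNat (PySem.List.pyGetD (PySem.List.pyGetD t (s + 1) []) 0 0),
           PySem.Set.add seen v) := by
        unfold pvScatterStep; rw [if_pos hC]
      rw [hstep, ih (s + 1) _ _ (by simpa using hlen)]
      by_cases hv : (j : Int) + 1 = v
      · have hseen : (j : Int) + 1 ∉ seen := hv ▸ hC.2.2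
        have hmem : ((j : Int) + 1) ∈ PySem.Set.add seen v := by
          rw [PySem.Set.mem_add]; exact Or.inr hv
        rw [if_pos hmem, if_neg hseen]
        have hvj : (v - 1).toNat = j := by omega
        rw [← hv, PySem.List.index?_cons_self]
        simp only [hv, hvj]
        rw [List.getElem?_set_self]
        · simp
        · omega
      · have hmem : (((j : Int) + 1) ∈ PySem.Set.add seen v) ↔ (((j : Int) + 1) ∈ seen) := by
          rw [PySem.Set.mem_add]
          exact Iff.intro (fun h => h.resolve_right hv) Or.inl
        have hne : (v - 1).toNat ≠ j := by omega
        rw [List.getElem?_set_ne hne,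
            PySem.List.index?_cons_of_ne vs (fun h => hv h.symm)]
        by_cases hs : ((j : Int) + 1) ∈ seen
        · rw [if_pos (hmem.mpr hs), if_pos hs]
        · rw [if_neg (fun h => hs (hmem.mp h)), if_neg hs]
          cases hix : PySem.List.index? vs ((j : Int) + 1) with
          | none => simp
          | some i =>
            simp only [Option.map_some]
            have : s + 1 + (i : Int) + 1 = s + ((i + 1 : Nat) : Int) + 1 := by push_cast; ring
            rw [this]
    · have hstep : pvScatterStep t n (res, seen) (s, v) = (res, seen) := by
        unfold pvScatterStep; rw [if_neg hC]
      rw [hstep, ih (s + 1) _ _ hlen]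
      by_cases hs : ((j : Int) + 1) ∈ seen
      · rw [if_pos hs, if_pos hs]
      · have hv : (j : Int) + 1 ≠ v := by
          intro h
          exact hC ⟨by omega, by omega, h ▸ hs⟩
        rw [if_neg hs, if_neg hs, PySem.List.index?_cons_of_ne vs (fun h => hv h.symm)]
        cases hix : PySem.List.index? vs ((j : Int) + 1) with
        | none => simp
        | some i =>
          simp only [Option.map_some]
          have : s + 1 + (i : Int) + 1 = s + ((i + 1 : Nat) : Int) + 1 := by push_cast; ring
          rw [this]

-- the two ports agree
theorem pv_monta_vetor_eq (t : List (List Int)) (rd : List (Int × Int)) (n : Int) :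
    monta_vetor_de_retorno_simplex_2_fases t rd n
      = monta_vetor_de_retorno_simplex_2_fases_alt t rd n := by
  unfold monta_vetor_de_retorno_simplex_2_fases monta_vetor_de_retorno_simplex_2_fases_alt
  set vals := rd.map (·.2) with hvals
  have hfun : (fun (r : List Int) (x : Int) =>
        if x ∈ vals then
          r ++ [PySem.List.pyGetD (PySem.List.pyGetD t ((((PySem.List.index? vals x).getD 0 : Nat) : Int) + 1) []) 0 0]
        else r ++ [0])
      = (fun (r : List Int) (x : Int) =>
          r ++ [if x ∈ vals then
              PySem.List.pyGetD (PySem.List.pyGetD t ((((PySem.List.index? vals x).getD 0 : Nat) : Int) + 1) []) 0 0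
            else 0]) := by
    funext r x
    split <;> rfl
  simp only []
  rw [hfun, pv_fold_append_map, List.nil_append]
  apply List.ext_getElem?
  intro j
  by_cases hj : j < n.toNat
  · have hA : (PySem.List.pyRange 1 (n + 1) 1)[j]? = some (1 + (j : Int)) := by
      rw [PySem.List.pyRange_one]
      rw [List.getElem?_map, List.getElem?_range (by omega : j < (n + 1 - 1).toNat)]
      rfl
    rw [List.getElem?_map, hA]
    rw [pv_scatter_get t n vals 0 _ _ j hj (by simp)]
    rw [if_neg (by simp [PySem.Set.empty])]
    have h1j : 1 + (j : Int) = (j : Int) + 1 := by ring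
    cases hix : PySem.List.index? vals ((j : Int) + 1) with
    | none =>
      have hm : ((j : Int) + 1) ∉ vals := (PySem.List.index?_eq_none_iff vals _).mp hix
      simp only [Option.map_some, h1j, if_neg hm]
      simp [hj]
    | some i =>
      have hm : ((j : Int) + 1) ∈ vals := by
        have := (PySem.List.index?_isSome_iff vals ((j : Int) + 1))
        rw [hix] at this
        exact this.mp rfl
      simp only [Option.map_some, h1j, if_pos hm, hix, Option.getD_some]
      norm_num
  · rw [List.getElem?_eq_none, List.getElem?_eq_none]
    · rw [pv_scatter_len]
      simp
      omega
    · rw [List.length_map, PySem.List.length_pyRange_one]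
      omega

-- ===== VERDICT (by name: the statement is the Claim_ definition above) =====
theorem monta_vetor_de_retorno_simplex_2_fases_spec : Claim_equal_monta_vetor_de_retorno_simplex_2_fases := by
  intro t rd n _ _
  unfold Spec_monta_vetor_de_retorno_simplex_2_fases
  exact pv_monta_vetor_eq t rd n
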